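-- pv_equiv track=rewrite | github.com/janhaus93/aws-cloud-wan-blueprints | patterns/5-sdwan/terraform/lambda/phase2_handler.py | get_tunnel_info
-- ===== SOURCE A (Python) =====
-- TUNNELS = [
--     {
--         "router_a": "nv-sdwan",
--         "router_b": "nv-branch1",
--         "vti_a": {"name": "vti0", "addr": "169.254.100.1/30"},
--         "vti_b": {"name": "vti0", "addr": "169.254.100.2/30"},
--     },
--     {
--         "router_a": "fra-sdwan",
--         "router_b": "fra-branch1",
--         "vti_a": {"name": "vti0", "addr": "169.254.100.13/30"},
--         "vti_b": {"name": "vti0", "addr": "169.254.100.14/30"},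
--     },
-- ]
--
-- def get_tunnel_info(router_name):
--     """Find the tunnel entry and peer info for a given router.
--
--     Args:
--         router_name: One of nv-sdwan, nv-branch1, fra-sdwan, fra-branch1
--
--     Returns:
--         list of dicts, each with keys:
--             - my_vti: VTI interface name (e.g. vti0)
--             - my_vti_addr: VTI address with mask (e.g. 169.254.100.1/30)
--             - peer_name: Peer router name
--             - peer_vti_ip: Peer VTI IP without mask (e.g. 169.254.100.2)
--         Returns empty list if router has no tunnels.
--     """
--     results = []
--     for tunnel in TUNNELS:
--         if router_name == tunnel["router_a"]:
--             peer_vti_ip = tunnel["vti_b"]["addr"].split("/")[0]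
--             results.append({
--                 "my_vti": tunnel["vti_a"]["name"],
--                 "my_vti_addr": tunnel["vti_a"]["addr"],
--                 "peer_name": tunnel["router_b"],
--                 "peer_vti_ip": peer_vti_ip,
--             })
--         elif router_name == tunnel["router_b"]:
--             peer_vti_ip = tunnel["vti_a"]["addr"].split("/")[0]
--             results.append({
--                 "my_vti": tunnel["vti_b"]["name"],
--                 "my_vti_addr": tunnel["vti_b"]["addr"],
--                 "peer_name": tunnel["router_a"],
--                 "peer_vti_ip": peer_vti_ip,
--             })
--     return results
-- ===== SOURCE B (Python) =====
-- TUNNELS = [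
--     {
--         "router_a": "nv-sdwan",
--         "router_b": "nv-branch1",
--         "vti_a": {"name": "vti0", "addr": "169.254.100.1/30"},
--         "vti_b": {"name": "vti0", "addr": "169.254.100.2/30"},
--     },
--     {
--         "router_a": "fra-sdwan",
--         "router_b": "fra-branch1",
--         "vti_a": {"name": "vti0", "addr": "169.254.100.13/30"},
--         "vti_b": {"name": "vti0", "addr": "169.254.100.14/30"},
--     },
-- ]
--
-- # Built once at module load: router name -> list of result entries, in tunnel order.
-- INDEX = {}
-- for _t in TUNNELS:
--     INDEX.setdefault(_t["router_a"], []).append({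
--         "my_vti": _t["vti_a"]["name"],
--         "my_vti_addr": _t["vti_a"]["addr"],
--         "peer_name": _t["router_b"],
--         "peer_vti_ip": _t["vti_b"]["addr"].split("/")[0],
--     })
--     INDEX.setdefault(_t["router_b"], []).append({
--         "my_vti": _t["vti_b"]["name"],
--         "my_vti_addr": _t["vti_b"]["addr"],
--         "peer_name": _t["router_a"],
--         "peer_vti_ip": _t["vti_a"]["addr"].split("/")[0],
--     })
--
-- def get_tunnel_info(router_name):
--     return [dict(e) for e in INDEX.get(router_name, [])]
-- ===== Notes on version B (the rewrite author's own statement) =====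
-- stated objective: idiomatic
-- what changed: Replaces the per-call scan over TUNNELS with a router-name index dict built once at module load; get_tunnel_info becomes a single dict lookup returning fresh copies of the precomputed entries.
import Mathlib
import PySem

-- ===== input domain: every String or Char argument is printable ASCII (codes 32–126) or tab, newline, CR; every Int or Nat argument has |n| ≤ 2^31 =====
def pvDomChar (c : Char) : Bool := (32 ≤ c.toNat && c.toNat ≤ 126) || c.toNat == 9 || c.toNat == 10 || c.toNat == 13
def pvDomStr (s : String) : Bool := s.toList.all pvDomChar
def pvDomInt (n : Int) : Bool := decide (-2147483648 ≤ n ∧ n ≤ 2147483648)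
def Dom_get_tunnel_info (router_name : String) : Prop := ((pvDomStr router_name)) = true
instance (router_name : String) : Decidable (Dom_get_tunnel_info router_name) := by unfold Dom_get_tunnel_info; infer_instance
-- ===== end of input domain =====

-- B replaces A's per-call scan of TUNNELS with a router-name → entries index built once; idiomatic lookup, same values.


-- ===== PORT A =====
-- module constant TUNNELS: (router_a, router_b, (vti_a name, vti_a addr), (vti_b name, vti_b addr))
def pvTunnels : List (String × String × (String × String) × (String × String)) :=
  [ ("nv-sdwan", "nv-branch1", ("vti0", "169.254.100.1/30"), ("vti0", "169.254.100.2/30")),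
    ("fra-sdwan", "fra-branch1", ("vti0", "169.254.100.13/30"), ("vti0", "169.254.100.14/30")) ]

def get_tunnel_info (router_name : String) : List (List (String × String)) :=
  pvTunnels.foldl (fun results t =>
    if router_name == t.1 then
      let peer_vti_ip := ((PySem.Str.split? t.2.2.2.2 "/").getD []).headD ""
      results ++ [[("my_vti", t.2.2.1.1), ("my_vti_addr", t.2.2.1.2),
                   ("peer_name", t.2.1), ("peer_vti_ip", peer_vti_ip)]]
    else if router_name == t.2.1 then
      let peer_vti_ip := ((PySem.Str.split? t.2.2.1.2 "/").getD []).headD ""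
      results ++ [[("my_vti", t.2.2.2.1), ("my_vti_addr", t.2.2.2.2),
                   ("peer_name", t.1), ("peer_vti_ip", peer_vti_ip)]]
    else results) []

-- ===== PORT B =====
-- INDEX built once at load: setdefault(k, []).append(e) = insert k (getD k [] ++ [e])
def pvIndex : PySem.Dict String (List (List (String × String))) :=
  pvTunnels.foldl (fun d t =>
    let eA : List (String × String) :=
      [("my_vti", t.2.2.1.1), ("my_vti_addr", t.2.2.1.2), ("peer_name", t.2.1),
       ("peer_vti_ip", ((PySem.Str.split? t.2.2.2.2 "/").getD []).headD "")]
    let d := d.insert t.1 (d.getD t.1 [] ++ [eA])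
    let eB : List (String × String) :=
      [("my_vti", t.2.2.2.1), ("my_vti_addr", t.2.2.2.2), ("peer_name", t.1),
       ("peer_vti_ip", ((PySem.Str.split? t.2.2.1.2 "/").getD []).headD "")]
    d.insert t.2.1 (d.getD t.2.1 [] ++ [eB])) PySem.Dict.empty

def get_tunnel_info_alt (router_name : String) : List (List (String × String)) :=
  pvIndex.getD router_name []

-- ===== PRECONDITION & SPEC =====
def Spec_get_tunnel_info (router_name : String) (out : List (List (String × String))) : Prop := out = get_tunnel_info_alt router_name
instance (router_name : String) (out : List (List (String × String))) : Decidable (Spec_get_tunnel_info router_name out) := by unfold Spec_get_tunnel_info; infer_instance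

-- ===== CLAIM (what is proved, stated in full; the proofs are below) =====
def Claim_equal_get_tunnel_info : Prop := ∀ (router_name : String), Dom_get_tunnel_info router_name → Spec_get_tunnel_info router_name (get_tunnel_info router_name)

-- ===== LEMMAS AND PROOFS =====

-- ===== VERDICT (by name: the statement is the Claim_ definition above) =====
theorem get_tunnel_info_spec : Claim_equal_get_tunnel_info := by
  intro rn _
  unfold Spec_get_tunnel_info get_tunnel_info get_tunnel_info_alt pvIndex pvTunnels
  by_cases h1 : rn = "nv-sdwan"
  · subst h1; decide
  by_cases h2 : rn = "nv-branch1"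
  · subst h2; decide
  by_cases h3 : rn = "fra-sdwan"
  · subst h3; decide
  by_cases h4 : rn = "fra-branch1"
  · subst h4; decide
  simp [List.foldl, PySem.Dict.getD, PySem.Dict.get?, PySem.Dict.insert, PySem.Dict.empty,
        List.find?, Ne.symm h1, Ne.symm h2, Ne.symm h3, Ne.symm h4]
  simp [h1, h2, h3, h4, beq_eq_false_iff_ne.mpr (Ne.symm h1), beq_eq_false_iff_ne.mpr (Ne.symm h2),
        beq_eq_false_iff_ne.mpr (Ne.symm h3), beq_eq_false_iff_ne.mpr (Ne.symm h4)]
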